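-- pv_equiv track=rewrite | github.com/nmaue/number-converter | chinese-converter.py | multiply_big
-- ===== SOURCE A (Python) =====
-- def multiply_big(list):
-- 	output = []
-- 	i = 0
-- 	while i < len(list):
-- 		if i != (len(list)-1):
-- 			output.append(list[i]*list[i+1])
-- 			i += 2
-- 		else:
-- 			output.append(list[i])
-- 			i += 1
-- 	return output
-- ===== SOURCE B (Python) =====
-- def multiply_big(list):
--     output = [a * b for a, b in zip(list[::2], list[1::2])]
--     if len(list) % 2 == 1:
--         output.append(list[-1])
--     return output
-- ===== Notes on version B (the rewrite author's own statement) =====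
-- stated objective: idiomatic
-- what changed: Replaces the index-stepping while-loop with inline parity branch by a zip of the two stride-2 slices lst[::2] and lst[1::2] (elementwise products) plus a single append of the unpaired last element when the length is odd.
import Mathlib
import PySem

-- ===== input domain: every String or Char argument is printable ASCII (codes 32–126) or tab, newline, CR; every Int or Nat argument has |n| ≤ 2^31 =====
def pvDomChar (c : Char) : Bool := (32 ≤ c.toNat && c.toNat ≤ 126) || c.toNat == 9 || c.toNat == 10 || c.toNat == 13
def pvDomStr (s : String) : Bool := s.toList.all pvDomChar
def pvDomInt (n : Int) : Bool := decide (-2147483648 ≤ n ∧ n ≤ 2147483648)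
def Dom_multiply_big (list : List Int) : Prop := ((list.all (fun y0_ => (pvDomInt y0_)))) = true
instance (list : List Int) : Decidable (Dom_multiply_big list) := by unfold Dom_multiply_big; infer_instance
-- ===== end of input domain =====

-- B pairs the elements via zip of the two stride-2 slices plus one tail fix-up, instead of A's
-- index-stepping while-loop with an inline parity branch (objective: idiomatic).

-- ===== PORT A =====
-- the while-loop of A: state (i, output), branches in A's order
def multiplyBigLoop (list : List Int) (i : Nat) (output : List Int) : List Int :=
  if h : i < list.length then
    if h2 : i ≠ list.length - 1 then
      multiplyBigLoop list (i + 2) (output ++ [list[i] * list[i+1]'(by omega)])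
    else
      multiplyBigLoop list (i + 1) (output ++ [list[i]])
  else
    output
termination_by list.length - i

def multiply_big (list : List Int) : List Int :=
  multiplyBigLoop list 0 []

-- ===== PORT B =====
def multiply_big_alt (list : List Int) : List Int :=
  let evens := (PySem.List.slice? list none none 2).getD []        -- list[::2]; step ≠ 0, never none
  let odds  := (PySem.List.slice? list (some 1) none 2).getD []    -- list[1::2]
  let output := (evens.zip odds).map (fun p => p.1 * p.2)
  if list.length % 2 == 1 then
    -- length is odd ⇒ list nonempty ⇒ list[-1] never raises; .getD 0 is unreachable
    output ++ [(PySem.List.pyGet? list (-1)).getD 0]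
  else
    output

-- ===== PRECONDITION & SPEC =====
def Spec_multiply_big (list : List Int) (out : List Int) : Prop := out = multiply_big_alt list
instance (list : List Int) (out : List Int) : Decidable (Spec_multiply_big list out) := by unfold Spec_multiply_big; infer_instance

-- ===== CLAIM (what is proved, stated in full; the proofs are below) =====
def Claim_equal_multiply_big : Prop := ∀ (list : List Int), Dom_multiply_big list → Spec_multiply_big list (multiply_big list)

-- ===== LEMMAS AND PROOFS =====

-- common reference shape: pairwise products, unpaired tail kept
def pvPairs : List Int → List Int
  | x :: y :: rest => x * y :: pvPairs rest
  | l => l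

theorem pvPairs_nil : pvPairs [] = [] := rfl
theorem pvPairs_single (x : Int) : pvPairs [x] = [x] := rfl
theorem pvPairs_cons2 (x y : Int) (r : List Int) : pvPairs (x :: y :: r) = x * y :: pvPairs r := rfl

-- A-side: the loop from index i produces output ++ pvPairs (list.drop i)
theorem loop_eq_pairs (list : List Int) (i : Nat) (output : List Int) :
    multiplyBigLoop list i output = output ++ pvPairs (list.drop i) := by
  induction i, output using multiplyBigLoop.induct list with
  | case1 i output h h2 ih =>
    rw [multiplyBigLoop, dif_pos h, dif_pos h2, ih]
    have h1 : i + 1 < list.length := by omega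
    rw [List.drop_eq_getElem_cons h, List.drop_eq_getElem_cons h1, pvPairs_cons2]
    simp
  | case2 i output h h2 ih =>
    rw [multiplyBigLoop, dif_pos h, dif_neg h2, ih]
    have he : list.drop (i+1) = [] := by
      apply List.drop_eq_nil_of_le; omega
    rw [List.drop_eq_getElem_cons h, he, pvPairs_single]
    simp [pvPairs]
  | case3 i output h =>
    rw [multiplyBigLoop, dif_neg h]
    have he : list.drop i = [] := by apply List.drop_eq_nil_of_le; omega
    rw [he, pvPairs_nil, List.append_nil]

-- B-side step lemmas
theorem evens_cons2 (x y : Int) (r : List Int) :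
    (PySem.List.slice? (x :: y :: r) none none 2).getD [] =
      x :: (PySem.List.slice? r none none 2).getD [] := by
  simp [PySem.List.slice?, PySem.List.sliceIndices]
  have hc1 : (if (0:Int) ≤ (r.length:Int) + 1 then (((r.length:Int) + 1 + 1 + 2 - 1) / 2).toNat else 0) = ((r.length+1)/2) + 1 := by
    rw [if_pos (by positivity)]; omega
  have hc2 : (if 0 < r.length then (((r.length:Int) + 2 - 1) / 2).toNat else 0) = (r.length+1)/2 := by
    split <;> omega
  rw [hc1, hc2, List.range_succ_eq_map, List.filterMap_cons, List.filterMap_map]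
  simp only [Nat.cast_zero, mul_zero, Int.toNat_zero, List.getElem?_cons_zero]
  congr 1

theorem odds_cons2 (x y : Int) (r : List Int) :
    (PySem.List.slice? (x :: y :: r) (some 1) none 2).getD [] =
      y :: (PySem.List.slice? r (some 1) none 2).getD [] := by
  simp [PySem.List.slice?, PySem.List.sliceIndices]
  cases r with
  | nil => norm_num [List.range_succ, List.filterMap_cons]
  | cons a r' =>
    have hc1 : ((((a :: r').length:Int) + 1 + 1 - min 1 ((((a :: r').length):Int) + 1 + 1) + 2 - 1) / 2).toNat = (a :: r').length/2 + 1 := by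
      have h : min (1:Int) (((a :: r').length:Int) + 1 + 1) = 1 := by
        simp; omega
      rw [h]; omega
    have hc2 : (if 1 < (a :: r').length then ((((a :: r').length:Int) - min 1 (((a :: r').length:Int)) + 2 - 1) / 2).toNat else 0) = (a :: r').length/2 := by
      have h : min (1:Int) (((a :: r').length:Int)) = 1 := by simp
      rw [h]; split <;> omega
    have hm : min (1:Int) (↑((a :: r').length)) = 1 := by simp
    rw [hc1, hc2, hm, List.range_succ_eq_map, List.filterMap_cons, List.filterMap_map]
    have hm' : min (1:Int) ((r'.length:Int) + 1 + 1 + 1) = 1 := by omega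
    simp only [List.length_cons, Nat.cast_add, Nat.cast_one, hm', Int.toNat_one,
      List.getElem?_cons_succ, List.getElem?_cons_zero]
    congr 1

theorem alt_nil : multiply_big_alt [] = [] := by decide

theorem alt_single (x : Int) : multiply_big_alt [x] = [x] := by
  simp [multiply_big_alt, PySem.List.slice?, PySem.List.sliceIndices,
    PySem.List.pyGet?_neg_one, List.range_succ]

theorem alt_cons2 (x y : Int) (r : List Int) :
    multiply_big_alt (x :: y :: r) = x * y :: multiply_big_alt r := by
  unfold multiply_big_alt
  rw [evens_cons2, odds_cons2]
  simp only [List.zip_cons_cons, List.map_cons]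
  have hpar : (((x :: y :: r).length % 2 == 1) : Bool) = ((r.length % 2 == 1) : Bool) := by
    simp only [List.length_cons]; congr 1; omega
  rw [hpar]
  by_cases hb : r.length % 2 = 1
  · have hb' : (r.length % 2 == 1) = true := by simp [hb]
    rw [hb']
    simp only [if_true]
    cases r with
    | nil => simp at hb
    | cons c r'' =>
      have hlast : PySem.List.pyGet? (x :: y :: c :: r'') (-1) = PySem.List.pyGet? (c :: r'') (-1) := by
        rw [PySem.List.pyGet?_neg_one, PySem.List.pyGet?_neg_one,
          List.getLast?_cons_cons, List.getLast?_cons_cons]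
      rw [hlast]
      simp
  · have hb' : (r.length % 2 == 1) = false := by simp [hb]
    rw [hb']
    simp

theorem alt_eq_pairs (list : List Int) : multiply_big_alt list = pvPairs list := by
  induction list using pvPairs.induct with
  | case1 x y r ih => rw [alt_cons2, pvPairs_cons2, ih]
  | case2 l h =>
    cases l with
    | nil => exact alt_nil
    | cons a t =>
      cases t with
      | nil => exact alt_single a
      | cons b u => exact absurd rfl (h a b u)

-- ===== VERDICT (by name: the statement is the Claim_ definition above) =====
theorem multiply_big_spec : Claim_equal_multiply_big := by
  intro list _
  unfold Spec_multiply_big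
  rw [alt_eq_pairs, multiply_big, loop_eq_pairs]
  simp
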